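-- pv_equiv track=rewrite | github.com/AtheMathmo/mli-release | scripts/train_cifar/gen_job_array.py | generate_job_strings
-- ===== SOURCE A (Python) =====
-- import itertools
--
-- COMMAND_TEMPLATE = 'python scripts/train_cifar/train.py with '
--
-- class ConfigIterator:
--     def __init__(self, conf):
--         self.conf = conf
--
--     def __iter__(self):
--         return itertools.product(*[self.conf[key] for key in self.conf])
--
-- def generate_job_strings(config):
--     jobs = []
--     for setting in ConfigIterator(config):
--         command = COMMAND_TEMPLATE
--         for i, k in enumerate(config):
--             command += "'{}={}' ".format(k, setting[i])
--         command += '\n'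
--         jobs.append(command)
--     return jobs
-- ===== SOURCE B (Python) =====
-- COMMAND_TEMPLATE = 'python scripts/train_cifar/train.py with '
--
-- def generate_job_strings(config):
--     jobs = [COMMAND_TEMPLATE]
--     for k in config:
--         jobs = [j + "'{}={}' ".format(k, v) for j in jobs for v in config[k]]
--     return [j + '\n' for j in jobs]
-- ===== Notes on version B (the rewrite author's own statement) =====
-- stated objective: simpler
-- what changed: Replaces itertools.product over positional tuples plus an index-based formatting loop by a single fold over the keys that incrementally expands partial command strings, dropping the ConfigIterator class entirely.
import Mathlib
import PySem

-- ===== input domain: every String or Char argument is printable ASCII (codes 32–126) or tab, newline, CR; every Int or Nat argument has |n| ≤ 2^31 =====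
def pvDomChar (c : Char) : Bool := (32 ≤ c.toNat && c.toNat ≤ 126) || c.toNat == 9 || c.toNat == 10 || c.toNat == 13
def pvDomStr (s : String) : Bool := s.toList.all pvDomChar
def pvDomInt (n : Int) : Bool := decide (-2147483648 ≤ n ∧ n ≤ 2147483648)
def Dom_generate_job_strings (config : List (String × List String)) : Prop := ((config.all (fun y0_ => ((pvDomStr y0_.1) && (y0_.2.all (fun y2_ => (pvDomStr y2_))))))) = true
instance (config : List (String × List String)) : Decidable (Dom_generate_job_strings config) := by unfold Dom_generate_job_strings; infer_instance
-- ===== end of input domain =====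

-- B rewrites A's itertools.product-over-tuples + positional formatting as one fold over the keys
-- that expands partial command strings incrementally (objective: simpler; same cost).

-- ===== PORT A =====
-- itertools.product(*lists): first list varies slowest, last fastest
def pyProductA (ls : List (List String)) : List (List String) :=
  match ls with
  | [] => [[]]
  | l :: rest => l.flatMap (fun x => (pyProductA rest).map (fun s => x :: s))

def generate_job_strings (config : List (String × List String)) : List String :=
  (pyProductA (config.map (fun kv => kv.2))).foldl
    (fun jobs setting =>
      jobs ++ [((PySem.List.enumerate config 0).foldl
        (fun command ik =>
          command ++ ("'" ++ ik.2.1 ++ "=" ++ ((PySem.List.pyGet? setting ik.1).getD "") ++ "' "))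
        "python scripts/train_cifar/train.py with ") ++ "\n"])
    []

-- ===== PORT B =====
def generate_job_strings_alt (config : List (String × List String)) : List String :=
  (config.foldl
    (fun jobs kv => jobs.flatMap (fun j => kv.2.map (fun v => j ++ ("'" ++ kv.1 ++ "=" ++ v ++ "' "))))
    ["python scripts/train_cifar/train.py with "]).map (fun j => j ++ "\n")

-- ===== PRECONDITION & SPEC =====
def Spec_generate_job_strings (config : List (String × List String)) (out : List String) : Prop := out = generate_job_strings_alt config
instance (config : List (String × List String)) (out : List String) : Decidable (Spec_generate_job_strings config out) := by unfold Spec_generate_job_strings; infer_instance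

-- ===== CLAIM (what is proved, stated in full; the proofs are below) =====
def Claim_equal_generate_job_strings : Prop := ∀ (config : List (String × List String)), Dom_generate_job_strings config → Spec_generate_job_strings config (generate_job_strings config)

-- ===== LEMMAS AND PROOFS =====

-- the "'k=v' " chunk both programs append
def pvPart (k v : String) : String := "'" ++ k ++ "=" ++ v ++ "' "

-- fold of the chunks over config paired with a setting
def pvZFold (c : String) (config : List (String × List String)) (s : List String) : String :=
  (config.zip s).foldl (fun c p => c ++ pvPart p.1.1 p.2) c

lemma length_mem_pyProductA : ∀ (ls : List (List String)) (s : List String),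
    s ∈ pyProductA ls → s.length = ls.length := by
  intro ls
  induction ls with
  | nil => intro s hs; simp [pyProductA] at hs; simp [hs]
  | cons l rest ih =>
    intro s hs
    simp [pyProductA] at hs
    obtain ⟨x, _, t, ht, rfl⟩ := hs
    simp [ih t ht]

lemma inner_fold_eq : ∀ (config : List (String × List String)) (setting rest : List String)
    (i : Nat) (c : String), setting.drop i = rest → config.length ≤ rest.length →
    (PySem.List.enumerate config (i : Int)).foldl
      (fun command ik =>
        command ++ ("'" ++ ik.2.1 ++ "=" ++ ((PySem.List.pyGet? setting ik.1).getD "") ++ "' "))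
      c = pvZFold c config rest := by
  intro config
  induction config with
  | nil => intro setting rest i c _ _; simp [PySem.List.enumerate_nil, pvZFold]
  | cons kv tl ih =>
    intro setting rest i c hdrop hlen
    cases rest with
    | nil => simp at hlen
    | cons v rest' =>
      rw [PySem.List.enumerate_cons]
      simp only [List.foldl_cons]
      have hget : PySem.List.pyGet? setting (i : Int) = some v := by
        rw [PySem.List.pyGet?_natCast]
        have : setting[i]? = (setting.drop i)[0]? := by
          simp [List.getElem?_drop]
        rw [this, hdrop]
        rfl
      rw [hget]
      have hdrop' : setting.drop (i + 1) = rest' := by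
        have : setting.drop (i + 1) = (setting.drop i).drop 1 := by
          rw [List.drop_drop]
        rw [this, hdrop]
        rfl
      have hcast : (i : Int) + 1 = ((i + 1 : Nat) : Int) := by push_cast; ring
      rw [hcast, ih setting rest' (i + 1) _ hdrop' (by simpa using Nat.le_of_succ_le_succ hlen)]
      simp [pvZFold, pvPart]

lemma outer_fold_eq : ∀ (config : List (String × List String)) (ps : List String),
    config.foldl
      (fun jobs kv => jobs.flatMap (fun j => kv.2.map (fun v => j ++ ("'" ++ kv.1 ++ "=" ++ v ++ "' "))))
      ps
      = ps.flatMap (fun p => (pyProductA (config.map (fun kv => kv.2))).map (fun s => pvZFold p config s)) := by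
  intro config
  induction config with
  | nil => intro ps; simp [pyProductA, pvZFold]
  | cons kv tl ih =>
    intro ps
    simp only [List.foldl_cons]
    rw [ih]
    simp only [pyProductA, List.map_cons, List.flatMap_assoc, List.flatMap_map]
    apply List.flatMap_congr
    intro p _
    rw [List.map_flatMap]
    apply List.flatMap_congr
    intro v _
    simp only [List.map_map, Function.comp_def]
    apply List.map_congr_left
    intro s _
    simp [pvZFold, pvPart]

-- ===== VERDICT (by name: the statement is the Claim_ definition above) =====
theorem generate_job_strings_spec : Claim_equal_generate_job_strings := by
  intro config _
  unfold Spec_generate_job_strings generate_job_strings generate_job_strings_alt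
  rw [outer_fold_eq, PySem.List.foldl_append_singleton_eq_map]
  simp only [List.flatMap_cons, List.flatMap_nil, List.append_nil, List.map_map,
    List.nil_append, Function.comp_def]
  apply List.map_congr_left
  intro s hs
  have hlen : s.length = config.length := by
    simpa using length_mem_pyProductA _ s hs
  have h := inner_fold_eq config s s 0 "python scripts/train_cifar/train.py with " (by simp)
    (by omega)
  simp only [Nat.cast_zero] at h
  rw [h]
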